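-- pv_equiv track=rewrite | github.com/FrancisNGG/app-sign | modules/utils/cookie_keepalive.py | page_indicates_logged_out
-- ===== SOURCE A (Python) =====
-- def page_indicates_logged_out(html_text):
--     """判断页面内容是否显示未登录状态"""
--     if not html_text:
--         return True
--     text = str(html_text).lower()
--     keywords = [
--         '请先登录', '先登录', '未登录', '登录后',
--         'member.php?mod=logging', 'action=login', '登录'
--     ]
--     return any(keyword in text for keyword in keywords)
-- ===== SOURCE B (Python) =====
-- _KEYWORDS = ('请先登录', '先登录', '未登录', '登录后',
--              'member.php?mod=logging', 'action=login', '登录')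
--
--
-- def page_indicates_logged_out(html_text):
--     """判断页面内容是否显示未登录状态"""
--     if not html_text:
--         return True
--     text = str(html_text).lower()
--     # single left-to-right scan over positions: at each position test whether
--     # any keyword starts there, instead of one full substring scan per keyword
--     return any(text.startswith(k, i)
--                for i in range(len(text) + 1)
--                for k in _KEYWORDS)
-- ===== Notes on version B (the rewrite author's own statement) =====
-- stated objective: alternative
-- what changed: B replaces A's per-keyword substring-containment scans with one left-to-right scan over text positions, testing at each position whether any keyword starts there via str.startswith(k, i).
import Mathlib
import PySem

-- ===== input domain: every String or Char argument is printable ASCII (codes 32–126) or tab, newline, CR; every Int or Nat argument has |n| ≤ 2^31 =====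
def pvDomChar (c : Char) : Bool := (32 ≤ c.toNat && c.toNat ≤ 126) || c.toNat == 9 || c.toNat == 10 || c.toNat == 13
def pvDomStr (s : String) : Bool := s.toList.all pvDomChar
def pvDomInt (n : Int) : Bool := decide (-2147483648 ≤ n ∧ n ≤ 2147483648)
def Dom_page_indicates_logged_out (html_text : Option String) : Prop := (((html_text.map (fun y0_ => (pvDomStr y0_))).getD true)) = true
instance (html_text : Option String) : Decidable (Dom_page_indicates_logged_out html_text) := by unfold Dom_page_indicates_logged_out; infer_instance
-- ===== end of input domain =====

-- B replaces the per-keyword substring scans with a single left-to-right scan over positions, testing each keyword with startswith (objective: alternative).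
-- ===== PORT A =====
def pvKeywordsA : List String :=
  ["请先登录", "先登录", "未登录", "登录后",
   "member.php?mod=logging", "action=login", "登录"]

def page_indicates_logged_out (html_text : Option String) : Bool :=
  match html_text with
  | none => true
  | some s =>
    if s = "" then true
    else
      let text := PySem.Str.lower s
      pvKeywordsA.any (fun keyword => PySem.Str.isIn keyword text)


-- ===== PORT B =====
def pvKeywordsB : List (List Char) :=
  ["请先登录".toList, "先登录".toList, "未登录".toList, "登录后".toList,
   "member.php?mod=logging".toList, "action=login".toList, "登录".toList]

-- text.startswith(k, i) with 0 ≤ i ≤ len(text) is ported exactly as: k is a prefix of text[i:]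
def page_indicates_logged_out_alt (html_text : Option String) : Bool :=
  match html_text with
  | none => true
  | some s =>
    if s = "" then true
    else
      let text := PySem.Chars.lower s.toList
      (PySem.List.pyRange 0 ((text.length : Int) + 1) 1).any (fun i =>
        pvKeywordsB.any (fun k => PySem.Chars.startswith (text.drop i.toNat) k))


-- ===== PRECONDITION & SPEC =====
def Spec_page_indicates_logged_out (html_text : Option String) (out : Bool) : Prop := out = page_indicates_logged_out_alt html_text
instance (html_text : Option String) (out : Bool) : Decidable (Spec_page_indicates_logged_out html_text out) := by unfold Spec_page_indicates_logged_out; infer_instance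

-- ===== CLAIM (what is proved, stated in full; the proofs are below) =====
def Claim_equal_page_indicates_logged_out : Prop := ∀ (html_text : Option String), Dom_page_indicates_logged_out html_text → Spec_page_indicates_logged_out html_text (page_indicates_logged_out html_text)

-- ===== LEMMAS AND PROOFS =====


lemma pv_any_swap {α β : Type} (l : List α) (m : List β) (f : α → β → Bool) :
    l.any (fun i => m.any (fun k => f i k)) = m.any (fun k => l.any (fun i => f i k)) := by
  rw [Bool.eq_iff_iff]
  simp only [List.any_eq_true]
  constructor <;> rintro ⟨a, ha, b, hb, h⟩ <;> exact ⟨b, hb, a, ha, h⟩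

lemma pv_scan_eq_isIn (k t : List Char) (hk : k ≠ []) :
    (PySem.List.pyRange 0 ((t.length : Int) + 1) 1).any
      (fun i => PySem.Chars.startswith (t.drop i.toNat) k) = PySem.Chars.isIn k t := by
  rw [Bool.eq_iff_iff]
  simp only [List.any_eq_true, PySem.List.mem_pyRange_one, PySem.Chars.startswith_iff]
  rw [← PySem.Chars.exists_prefix_drop_iff_isIn]
  constructor
  · rintro ⟨i, ⟨h0, hlt⟩, hp⟩
    exact ⟨i.toNat, hp⟩
  · rintro ⟨j, hp⟩
    have hj : j ≤ t.length := by
      by_contra h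
      push Not at h
      rw [List.drop_eq_nil_of_le (le_of_lt h)] at hp
      exact hk (List.prefix_nil.mp hp)
    exact ⟨(j : Int), ⟨by omega, by omega⟩, by simpa using hp⟩
-- ===== VERDICT (by name: the statement is the Claim_ definition above) =====
theorem page_indicates_logged_out_spec : Claim_equal_page_indicates_logged_out := by
  intro ht _
  unfold Spec_page_indicates_logged_out
  match ht with
  | none => rfl
  | some s =>
    simp only [page_indicates_logged_out, page_indicates_logged_out_alt]
    by_cases hs : s = ""
    · simp [hs]
    · simp only [if_neg hs]
      rw [pv_any_swap]
      have hne : ∀ k ∈ pvKeywordsB, k ≠ [] := by decide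
      rw [PySem.List.any_congr_mem
        (g := fun k => PySem.Chars.isIn k (PySem.Chars.lower s.toList))
        (fun k hk => pv_scan_eq_isIn k _ (hne k hk))]
      simp [pvKeywordsA, pvKeywordsB]
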